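-- pv_equiv track=rewrite | github.com/SimGus/Chatette | chatette/parsing/parser_utils.py | next_sub_rule_tokens
-- ===== SOURCE A (Python) =====
-- ALIAS_SYM = '~'
--
-- SLOT_SYM = '@'
--
-- INTENT_SYM = '%'
--
-- UNIT_OPEN_SYM = '['  # This shouldn't be changed
--
-- UNIT_CLOSE_SYM = ']'  # id.
--
-- CHOICE_OPEN_SYM = r'{'
--
-- CHOICE_CLOSE_SYM = r'}'
--
-- def is_start_unit_sym(char):
--     """Checks if character `char` is the starting character of a special unit."""
--     return char == UNIT_OPEN_SYM or char == ALIAS_SYM or \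
--            char == SLOT_SYM or char == INTENT_SYM
--
-- def next_sub_rule_tokens(tokens):
--     """
--     Yields the next sub-rule from a rule
--     represented as tokens (i.e. a list of str).
--     @pre: `tokens` represents a valid rule.
--     """
--     current_sub_rule = []
--     stop_with_char = None
--     reading_sub_rule = False
--     for token in tokens:
--         if reading_sub_rule:
--             if token == stop_with_char:
--                 current_sub_rule.append(token)
--                 yield current_sub_rule
--                 current_sub_rule = []
--                 stop_with_char = None
--                 reading_sub_rule = False
--             else:
--                 current_sub_rule.append(token)
--         else:  # Looking for the start of a sub-rule
--             if is_start_unit_sym(token):  # Unit reference starting point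
--                 current_sub_rule.append(token)
--                 reading_sub_rule = True
--                 stop_with_char = UNIT_CLOSE_SYM
--             elif token == UNIT_OPEN_SYM:  # Word group starting point
--                 current_sub_rule.append(token)
--                 reading_sub_rule = True
--                 stop_with_char = UNIT_CLOSE_SYM
--             elif token == CHOICE_OPEN_SYM:  # Word group starting point
--                 current_sub_rule.append(token)
--                 reading_sub_rule = True
--                 stop_with_char = CHOICE_CLOSE_SYM
--             else:  # Word
--                 yield [token]
-- ===== SOURCE B (Python) =====
-- def next_sub_rule_tokens(tokens):
--     """Index-based scanner: find each group's close with an inner loop."""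
--     i = 0
--     n = len(tokens)
--     while i < n:
--         token = tokens[i]
--         if token in ('[', '~', '@', '%'):
--             close = ']'
--         elif token == '{':
--             close = '}'
--         else:
--             yield [token]
--             i += 1
--             continue
--         group = [token]
--         i += 1
--         while i < n and tokens[i] != close:
--             group.append(tokens[i])
--             i += 1
--         if i < n:
--             group.append(close)
--             i += 1
--             yield group
--         else:
--             return
-- ===== Notes on version B (the rewrite author's own statement) =====
-- stated objective: alternative
-- what changed: Replaced A's boolean/stop-char state machine (one flat loop carrying reading_sub_rule/stop_with_char/current_sub_rule across iterations) with an index-based scanner whose inner while-loop consumes a whole group up to its closing symbol in one step, yielding each group immediately.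
import Mathlib
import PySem

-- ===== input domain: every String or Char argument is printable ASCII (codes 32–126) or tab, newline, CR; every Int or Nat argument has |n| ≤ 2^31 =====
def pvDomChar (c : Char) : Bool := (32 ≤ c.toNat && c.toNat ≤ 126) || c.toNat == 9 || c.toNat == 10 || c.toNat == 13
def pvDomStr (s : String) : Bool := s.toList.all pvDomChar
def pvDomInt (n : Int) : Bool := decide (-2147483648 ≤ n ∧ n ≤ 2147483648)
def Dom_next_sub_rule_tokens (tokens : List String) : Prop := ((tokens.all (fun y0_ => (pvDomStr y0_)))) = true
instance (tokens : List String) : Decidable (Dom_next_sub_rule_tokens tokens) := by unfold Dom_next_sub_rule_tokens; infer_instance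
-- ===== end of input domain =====

-- B replaces A's flat state-machine loop by an index/suffix scanner with an inner
-- loop that consumes a whole group up to its close symbol (objective: alternative).
-- Both Pythons are generators; equivalence is about the yielded sequence as a list.

-- ===== PORT A =====
-- is_start_unit_sym
def pvStartSym (t : String) : Bool :=
  t == "[" || t == "~" || t == "@" || t == "%"

-- A's loop: state = (current_sub_rule, stop_with_char, reading_sub_rule); yields collected in order.
def pvNextA : List String → List String → Option String → Bool → List (List String)
  | [], _, _, _ => []
  | t :: rest, cur, stop, reading =>
    if reading then
      if stop == some t then
        (cur ++ [t]) :: pvNextA rest [] none false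
      else
        pvNextA rest (cur ++ [t]) stop reading
    else
      if pvStartSym t then
        pvNextA rest (cur ++ [t]) (some "]") true
      else if t == "[" then
        pvNextA rest (cur ++ [t]) (some "]") true
      else if t == "{" then
        pvNextA rest (cur ++ [t]) (some "}") true
      else
        [t] :: pvNextA rest cur stop reading

def next_sub_rule_tokens (tokens : List String) : List (List String) :=
  pvNextA tokens [] none false

-- ===== PORT B =====
-- B's inner while: append tokens until `close`; some (group with close, remaining) if found.
def pvScanGroup (close : String) (group : List String) : List String → Option (List String × List String)
  | [] => none
  | t :: rest =>
    if t == close then some (group ++ [close], rest)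
    else pvScanGroup close (group ++ [t]) rest

theorem pvScanGroup_len {close : String} {g gr rs : List String} :
    ∀ {l : List String}, pvScanGroup close g l = some (gr, rs) → rs.length ≤ l.length := by
  intro l
  induction l generalizing g with
  | nil => intro h; simp [pvScanGroup] at h
  | cons t rest ih =>
    intro h
    simp only [pvScanGroup] at h
    split at h
    · cases h; simp
    · exact Nat.le_trans (ih h) (Nat.le_succ _)

-- B's outer while over the index, as recursion on the remaining suffix.
def next_sub_rule_tokens_alt (tokens : List String) : List (List String) :=
  match tokens with
  | [] => []
  | t :: rest =>
    if pvStartSym t then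
      match hscan : pvScanGroup "]" [t] rest with
      | some (g, rs) => g :: next_sub_rule_tokens_alt rs
      | none => []
    else if t == "{" then
      match hscan : pvScanGroup "}" [t] rest with
      | some (g, rs) => g :: next_sub_rule_tokens_alt rs
      | none => []
    else
      [t] :: next_sub_rule_tokens_alt rest
termination_by tokens.length
decreasing_by
  · exact Nat.lt_succ_of_le (pvScanGroup_len hscan)
  · exact Nat.lt_succ_of_le (pvScanGroup_len hscan)
  · simp

-- ===== PRECONDITION & SPEC =====
def Spec_next_sub_rule_tokens (tokens : List String) (out : List (List String)) : Prop := out = next_sub_rule_tokens_alt tokens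
instance (tokens : List String) (out : List (List String)) : Decidable (Spec_next_sub_rule_tokens tokens out) := by unfold Spec_next_sub_rule_tokens; infer_instance

-- ===== CLAIM (what is proved, stated in full; the proofs are below) =====
def Claim_equal_next_sub_rule_tokens : Prop := ∀ (tokens : List String), Dom_next_sub_rule_tokens tokens → Spec_next_sub_rule_tokens tokens (next_sub_rule_tokens tokens)

-- ===== LEMMAS AND PROOFS =====

-- While A is reading a group with stop char c, it behaves like B's inner scan.
theorem pvNextA_reading (c : String) :
    ∀ (l g : List String),
      pvNextA l g (some c) true =
        (match pvScanGroup c g l with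
         | some (gr, rs) => gr :: pvNextA rs [] none false
         | none => []) := by
  intro l
  induction l with
  | nil => intro g; simp [pvNextA, pvScanGroup]
  | cons t rest ih =>
    intro g
    by_cases h : t = c
    · subst h; simp [pvNextA, pvScanGroup]
    · have h1 : (some c == some t) = false := by
        have hct : ¬ c = t := fun e => h (Eq.symm e)
        simp [hct]
      have h2 : (t == c) = false := by simp [h]
      simp only [pvNextA, pvScanGroup, h1, h2, if_false, Bool.false_eq_true]
      exact ih (g ++ [t])

theorem pvNextA_eq_alt : ∀ (tokens : List String),
    pvNextA tokens [] none false = next_sub_rule_tokens_alt tokens := by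
  intro tokens
  induction tokens using next_sub_rule_tokens_alt.induct with
  | case1 => simp [pvNextA, next_sub_rule_tokens_alt]
  | case2 t rest hs g rs hscan ih =>
    rw [next_sub_rule_tokens_alt]
    simp [pvNextA, pvNextA_reading, hs, hscan, ih]
    split <;> simp_all
  | case3 t rest hs hscan =>
    rw [next_sub_rule_tokens_alt]
    simp [pvNextA, pvNextA_reading, hs, hscan]
    split <;> simp_all
  | case4 t rest hs hc g rs hscan ih =>
    rw [next_sub_rule_tokens_alt]
    have hno : (t == "[") = false := by
      have := hs; simp [pvStartSym] at this; simp [this.1]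
    simp [pvNextA, pvNextA_reading, hs, hno, hc, hscan, ih]
    split <;> simp_all
  | case5 t rest hs hc hscan =>
    rw [next_sub_rule_tokens_alt]
    have hno : (t == "[") = false := by
      have := hs; simp [pvStartSym] at this; simp [this.1]
    simp [pvNextA, pvNextA_reading, hs, hno, hc, hscan]
    split <;> simp_all
  | case6 t rest hs hc ih =>
    rw [next_sub_rule_tokens_alt]
    have hno : (t == "[") = false := by
      have := hs; simp [pvStartSym] at this; simp [this.1]
    simp [pvNextA, hs, hno, hc, ih]

-- ===== VERDICT (by name: the statement is the Claim_ definition above) =====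
theorem next_sub_rule_tokens_spec : Claim_equal_next_sub_rule_tokens := by
  intro tokens _
  unfold Spec_next_sub_rule_tokens next_sub_rule_tokens
  exact pvNextA_eq_alt tokens
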